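-- pv_equiv track=rewrite | github.com/cms-L1TK/firmware-hls | emData/generate_VMRCM.py | getAllStubInnerMaskString
-- ===== SOURCE A (Python) =====
-- def getAllStubInnerMaskString(mem_list):
--
--     as_inner_list = ["OR", "OM", "OL", "BR/DR", "BM/DM", "BL/DL", "BF", "BE", "BD", "BC", "BB", "BA"]
--     mask = "0b";
--
--     # Loop over all the different AllStub Inner type
--     for mem_type in as_inner_list:
--         if any(mem_type in mem for mem in mem_list):
--             mask += "1"
--         elif "/" in mem_type:
--             if any(mem_type.split("/")[0] in mem for mem in mem_list) or any(mem_type.split("/")[1] in mem for mem in mem_list):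
--                 mask += "1"
--             else:
--                 mask += "0"
--         else:
--             mask += "0"
--
--     return mask
-- ===== SOURCE B (Python) =====
-- def getAllStubInnerMaskString(mem_list):
--     patterns = ["OR", "OM", "OL", "BR/DR", "BM/DM", "BL/DL", "BF", "BE", "BD", "BC", "BB", "BA"]
--     needles = [p.split("/") for p in patterns]
--     hits = [False] * len(patterns)
--     for mem in mem_list:
--         hits = [h or any(n in mem for n in ns) for h, ns in zip(hits, needles)]
--     return "0b" + "".join("1" if h else "0" for h in hits)
-- ===== Notes on version B (the rewrite author's own statement) =====
-- stated objective: alternative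
-- what changed: A scans the whole member list up to three times per pattern (12 patterns, outer loop over patterns); B precomputes each pattern's needle list via split('/'), makes a single pass over mem_list updating a 12-slot boolean hit table, and assembles the mask in a separate final pass.
import Mathlib
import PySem

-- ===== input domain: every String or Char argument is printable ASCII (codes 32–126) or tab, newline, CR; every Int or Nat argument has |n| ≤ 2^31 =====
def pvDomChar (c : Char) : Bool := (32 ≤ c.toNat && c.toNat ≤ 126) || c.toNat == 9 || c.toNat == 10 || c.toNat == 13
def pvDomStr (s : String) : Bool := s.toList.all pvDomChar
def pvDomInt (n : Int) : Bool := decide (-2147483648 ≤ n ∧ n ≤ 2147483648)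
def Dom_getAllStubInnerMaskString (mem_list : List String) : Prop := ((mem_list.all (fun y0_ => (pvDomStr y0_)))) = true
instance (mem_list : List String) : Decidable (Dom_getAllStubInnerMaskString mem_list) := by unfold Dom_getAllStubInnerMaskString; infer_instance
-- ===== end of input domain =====

-- B replaces A's per-pattern scans over mem_list by a single pass over mem_list that fills a
-- 12-slot hit table from precomputed needle lists, then assembles the mask; objective: alternative.

-- ===== PORT A =====
def getAllStubInnerMaskString (mem_list : List String) : String :=
  let as_inner_list : List String := ["OR", "OM", "OL", "BR/DR", "BM/DM", "BL/DL", "BF", "BE", "BD", "BC", "BB", "BA"]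
  as_inner_list.foldl (fun mask mem_type =>
    if mem_list.any (fun mem => PySem.Str.isIn mem_type mem) then
      mask ++ "1"
    else if PySem.Str.isIn "/" mem_type then
      if mem_list.any (fun mem =>
            PySem.Str.isIn (PySem.List.pyGetD ((PySem.Str.split? mem_type "/").getD []) 0 "") mem)
         || mem_list.any (fun mem =>
            PySem.Str.isIn (PySem.List.pyGetD ((PySem.Str.split? mem_type "/").getD []) 1 "") mem) then
        mask ++ "1"
      else
        mask ++ "0"
    else
      mask ++ "0") "0b"

-- ===== PORT B =====
def getAllStubInnerMaskString_alt (mem_list : List String) : String :=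
  let patterns : List String := ["OR", "OM", "OL", "BR/DR", "BM/DM", "BL/DL", "BF", "BE", "BD", "BC", "BB", "BA"]
  let needles : List (List String) := patterns.map (fun p => (PySem.Str.split? p "/").getD [])
  let hits : List Bool := mem_list.foldl
    (fun hits mem => (hits.zip needles).map
      (fun hn => hn.1 || hn.2.any (fun n => PySem.Str.isIn n mem)))
    (List.replicate patterns.length false)
  "0b" ++ PySem.Str.join "" (hits.map (fun h => if h then "1" else "0"))


-- ===== PRECONDITION & SPEC =====
def Spec_getAllStubInnerMaskString (mem_list : List String) (out : String) : Prop := out = getAllStubInnerMaskString_alt mem_list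
instance (mem_list : List String) (out : String) : Decidable (Spec_getAllStubInnerMaskString mem_list out) := by unfold Spec_getAllStubInnerMaskString; infer_instance

-- ===== CLAIM (what is proved, stated in full; the proofs are below) =====
def Claim_equal_getAllStubInnerMaskString : Prop := ∀ (mem_list : List String), Dom_getAllStubInnerMaskString mem_list → Spec_getAllStubInnerMaskString mem_list (getAllStubInnerMaskString mem_list)

-- ===== LEMMAS AND PROOFS =====
lemma pvZipMapZip {α β γ δ : Type} (F : α → β → γ) (G : γ → β → δ) :
    ∀ (xs : List α) (ys : List β),
      (((xs.zip ys).map (fun p => F p.1 p.2)).zip ys).map (fun p => G p.1 p.2)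
        = (xs.zip ys).map (fun p => G (F p.1 p.2) p.2) := by
  intro xs
  induction xs with
  | nil => intro ys; simp
  | cons x xs ih =>
    intro ys
    cases ys with
    | nil => simp
    | cons y ys => simp [ih]

lemma pvHitsFold (needles : List (List String)) (ms : List String) :
    ∀ (init : List Bool), init.length = needles.length →
      ms.foldl (fun hits mem => (hits.zip needles).map
          (fun hn => hn.1 || hn.2.any (fun n => PySem.Str.isIn n mem))) init
        = (init.zip needles).map
            (fun p => p.1 || ms.any (fun mem => p.2.any (fun n => PySem.Str.isIn n mem))) := by
  induction ms with
  | nil =>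
    intro init hlen
    simp only [List.foldl_nil, List.any_nil, Bool.or_false]
    simpa using (List.map_fst_zip (l₁ := init) (l₂ := needles) (le_of_eq hlen)).symm
  | cons m ms ih =>
    intro init hlen
    simp only [List.foldl_cons]
    rw [ih ((init.zip needles).map
        (fun hn => hn.1 || hn.2.any (fun n => PySem.Str.isIn n m)))
        (by simp [List.length_zip, hlen])]
    rw [pvZipMapZip (fun (b : Bool) (ns : List String) => b || ns.any (fun n => PySem.Str.isIn n m))
        (fun (b : Bool) (ns : List String) => b || ms.any (fun mem => ns.any (fun n => PySem.Str.isIn n mem)))]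
    simp [List.any_cons, Bool.or_assoc]

lemma pvAnyOr (xs : List String) (f g : String → Bool) :
    xs.any (fun x => f x || g x) = (xs.any f || xs.any g) := by
  induction xs with
  | nil => simp
  | cons x xs ih =>
    simp only [List.any_cons, ih]
    cases f x <;> cases g x <;> simp

lemma pvIsInMono (full h : String) (m : String)
    (hpre : h.toList <:+: full.toList)
    (hm : PySem.Str.isIn full m = true) : PySem.Str.isIn h m = true := by
  rw [PySem.Str.isIn_iff_infix] at hm ⊢
  exact hpre.trans hm

lemma pvSlashBit (ml : List String) (full h1 h2 : String)
    (hpre : h1.toList <:+: full.toList) :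
    (if ml.any (fun m => PySem.Str.isIn full m) then ("1" : String)
     else if ml.any (fun m => PySem.Str.isIn h1 m) || ml.any (fun m => PySem.Str.isIn h2 m)
          then "1" else "0")
    = if ml.any (fun m => PySem.Str.isIn h1 m) || ml.any (fun m => PySem.Str.isIn h2 m)
      then "1" else "0" := by
  by_cases hc : (ml.any fun m => PySem.Str.isIn full m) = true
  · have hd : (ml.any (fun m => PySem.Str.isIn h1 m) || ml.any (fun m => PySem.Str.isIn h2 m)) = true := by
      obtain ⟨m, hmem, hin⟩ := List.any_eq_true.mp hc
      simp only [Bool.or_eq_true, List.any_eq_true]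
      exact Or.inl ⟨m, hmem, pvIsInMono full h1 m hpre hin⟩
    rw [if_pos hc, if_pos hd]
  · rw [if_neg hc]

def pvBitA (ml : List String) (p : String) : String :=
  if ml.any (fun mem => PySem.Str.isIn p mem) then "1"
  else if PySem.Str.isIn "/" p then
    if ml.any (fun mem =>
          PySem.Str.isIn (PySem.List.pyGetD ((PySem.Str.split? p "/").getD []) 0 "") mem)
       || ml.any (fun mem =>
          PySem.Str.isIn (PySem.List.pyGetD ((PySem.Str.split? p "/").getD []) 1 "") mem) then "1"
    else "0"
  else "0"

theorem pvMain (ml : List String) :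
    getAllStubInnerMaskString ml = getAllStubInnerMaskString_alt ml := by
  have hstep : ∀ (mask p : String),
      (if ml.any (fun mem => PySem.Str.isIn p mem) then mask ++ "1"
       else if PySem.Str.isIn "/" p then
         if ml.any (fun mem =>
               PySem.Str.isIn (PySem.List.pyGetD ((PySem.Str.split? p "/").getD []) 0 "") mem)
            || ml.any (fun mem =>
               PySem.Str.isIn (PySem.List.pyGetD ((PySem.Str.split? p "/").getD []) 1 "") mem) then
           mask ++ "1"
         else mask ++ "0"
       else mask ++ "0") = mask ++ pvBitA ml p := by
    intro mask p
    unfold pvBitA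
    split_ifs <;> rfl
  unfold getAllStubInnerMaskString getAllStubInnerMaskString_alt
  simp only [List.foldl_cons, List.foldl_nil, hstep]
  rw [pvHitsFold _ ml _ (by simp)]
  rw [show (List.replicate ["OR", "OM", "OL", "BR/DR", "BM/DM", "BL/DL", "BF", "BE", "BD", "BC",
          "BB", "BA"].length false).zip
        (List.map (fun p => (PySem.Str.split? p "/").getD [])
          ["OR", "OM", "OL", "BR/DR", "BM/DM", "BL/DL", "BF", "BE", "BD", "BC", "BB", "BA"])
      = [(false, ["OR"]), (false, ["OM"]), (false, ["OL"]), (false, ["BR", "DR"]),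
         (false, ["BM", "DM"]), (false, ["BL", "DL"]), (false, ["BF"]), (false, ["BE"]),
         (false, ["BD"]), (false, ["BC"]), (false, ["BB"]), (false, ["BA"])] from by decide]
  simp only [List.map_cons, List.map_nil, List.any_cons, List.any_nil, Bool.or_false,
    Bool.false_or, pvAnyOr]
  have hplain : ∀ p : String, PySem.Str.isIn "/" p = false →
      pvBitA ml p = (if (ml.any fun mem => PySem.Str.isIn p mem) = true then "1" else "0") := by
    intro p hp
    unfold pvBitA
    simp only [hp, Bool.false_eq_true, if_false]
  have hBR : pvBitA ml "BR/DR" =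
      (if (ml.any (PySem.Str.isIn "BR") || ml.any (PySem.Str.isIn "DR")) = true then "1" else "0") := by
    unfold pvBitA
    rw [if_pos (show PySem.Str.isIn "/" "BR/DR" = true from by decide)]
    rw [show PySem.List.pyGetD ((PySem.Str.split? "BR/DR" "/").getD []) 0 "" = "BR" from by decide,
        show PySem.List.pyGetD ((PySem.Str.split? "BR/DR" "/").getD []) 1 "" = "DR" from by decide]
    exact pvSlashBit ml "BR/DR" "BR" "DR" (by decide)
  have hBM : pvBitA ml "BM/DM" =
      (if (ml.any (PySem.Str.isIn "BM") || ml.any (PySem.Str.isIn "DM")) = true then "1" else "0") := by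
    unfold pvBitA
    rw [if_pos (show PySem.Str.isIn "/" "BM/DM" = true from by decide)]
    rw [show PySem.List.pyGetD ((PySem.Str.split? "BM/DM" "/").getD []) 0 "" = "BM" from by decide,
        show PySem.List.pyGetD ((PySem.Str.split? "BM/DM" "/").getD []) 1 "" = "DM" from by decide]
    exact pvSlashBit ml "BM/DM" "BM" "DM" (by decide)
  have hBL : pvBitA ml "BL/DL" =
      (if (ml.any (PySem.Str.isIn "BL") || ml.any (PySem.Str.isIn "DL")) = true then "1" else "0") := by
    unfold pvBitA
    rw [if_pos (show PySem.Str.isIn "/" "BL/DL" = true from by decide)]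
    rw [show PySem.List.pyGetD ((PySem.Str.split? "BL/DL" "/").getD []) 0 "" = "BL" from by decide,
        show PySem.List.pyGetD ((PySem.Str.split? "BL/DL" "/").getD []) 1 "" = "DL" from by decide]
    exact pvSlashBit ml "BL/DL" "BL" "DL" (by decide)
  rw [hplain "OR" (by decide), hplain "OM" (by decide), hplain "OL" (by decide), hBR, hBM, hBL,
      hplain "BF" (by decide), hplain "BE" (by decide), hplain "BD" (by decide),
      hplain "BC" (by decide), hplain "BB" (by decide), hplain "BA" (by decide)]
  apply String.toList_inj.mp
  simp [String.toList_append, PySem.Str.join, PySem.Chars.join, List.intercalate]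

-- ===== VERDICT (by name: the statement is the Claim_ definition above) =====
theorem getAllStubInnerMaskString_spec : Claim_equal_getAllStubInnerMaskString := by
  intro mem_list _
  unfold Spec_getAllStubInnerMaskString
  exact pvMain mem_list
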